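-- pv_equiv track=rewrite | github.com/TremayneKS/codonaware-mutation-analysis | call_mutations.py | build_ref_nt_positions
-- ===== SOURCE A (Python) =====
-- BASES_STRICT = set("ACGT")
--
-- def build_ref_nt_positions(ref_seq: str):
--     L = len(ref_seq)
--     ref_pos = [None] * L
--     nt_pos = 0
--     for i, r in enumerate(ref_seq):
--         r = r.upper()
--         if r in BASES_STRICT or r == "N":
--             nt_pos += 1
--             ref_pos[i] = nt_pos
--         else:
--             ref_pos[i] = None
--     return ref_pos, nt_pos
-- ===== SOURCE B (Python) =====
-- def build_ref_nt_positions(ref_seq: str):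
--     # mark valid nucleotide characters, then take prefix sums and shape the output
--     flags = [c.upper() in "ACGTN" for c in ref_seq]
--     prefix = []
--     t = 0
--     for f in flags:
--         t += f
--         prefix.append(t)
--     ref_pos = [p if f else None for f, p in zip(flags, prefix)]
--     return ref_pos, (prefix[-1] if prefix else 0)
-- ===== Notes on version B (the rewrite author's own statement) =====
-- stated objective: idiomatic
-- what changed: Replaces the single stateful pass that writes into a preallocated list with a map-to-flags / prefix-sum / shaped-zip pipeline; the total is read off the last prefix sum instead of a running counter.
import Mathlib
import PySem

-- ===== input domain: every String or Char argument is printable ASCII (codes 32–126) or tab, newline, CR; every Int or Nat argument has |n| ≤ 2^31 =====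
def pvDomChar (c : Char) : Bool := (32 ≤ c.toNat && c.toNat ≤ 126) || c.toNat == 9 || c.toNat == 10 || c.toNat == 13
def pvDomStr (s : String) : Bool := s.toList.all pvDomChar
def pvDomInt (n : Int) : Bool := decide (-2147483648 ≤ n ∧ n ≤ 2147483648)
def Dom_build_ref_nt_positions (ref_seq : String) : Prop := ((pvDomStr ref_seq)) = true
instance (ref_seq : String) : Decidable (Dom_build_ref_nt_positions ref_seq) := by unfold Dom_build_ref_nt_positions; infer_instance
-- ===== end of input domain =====

-- B replaces A's stateful write-into-preallocated-list pass by a flags / prefix-sum / shaped-zip pipeline (idiomatic decomposition, same cost).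

-- ===== PORT A =====
-- BASES_STRICT = set("ACGT")
def BASES_STRICT : PySem.Set Char := PySem.Set.ofList "ACGT".toList

def build_ref_nt_positions (ref_seq : String) : List (Option Int) × Int :=
  let L : Int := PySem.Str.len ref_seq
  let init : List (Option Int) := List.replicate L.toNat none
  (PySem.List.enumerate ref_seq.toList 0).foldl
    (fun (st : List (Option Int) × Int) (p : Int × Char) =>
      let r := PySem.Chars.upperChar p.2
      if PySem.Set.contains BASES_STRICT r || (r == 'N') then
        (PySem.List.pySetD st.1 p.1 (some (st.2 + 1)), st.2 + 1)
      else
        (PySem.List.pySetD st.1 p.1 none, st.2))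
    (init, 0)

-- ===== PORT B =====
def build_ref_nt_positions_alt (ref_seq : String) : List (Option Int) × Int :=
  let flags : List Bool :=
    ref_seq.toList.map (fun c => "ACGTN".toList.contains (PySem.Chars.upperChar c))
  let pref : List Int :=
    (flags.foldl (fun (acc : List Int × Int) f =>
        let t := acc.2 + (if f then 1 else 0)
        (acc.1 ++ [t], t)) ([], 0)).1
  let ref_pos : List (Option Int) :=
    (flags.zip pref).map (fun p => if p.1 then some p.2 else none)
  (ref_pos, pref.getLast?.getD 0)

-- ===== PRECONDITION & SPEC =====
def Spec_build_ref_nt_positions (ref_seq : String) (out : List (Option Int) × Int) : Prop := out = build_ref_nt_positions_alt ref_seq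
instance (ref_seq : String) (out : List (Option Int) × Int) : Decidable (Spec_build_ref_nt_positions ref_seq out) := by unfold Spec_build_ref_nt_positions; infer_instance

-- ===== CLAIM (what is proved, stated in full; the proofs are below) =====
def Claim_equal_build_ref_nt_positions : Prop := ∀ (ref_seq : String), Dom_build_ref_nt_positions ref_seq → Spec_build_ref_nt_positions ref_seq (build_ref_nt_positions ref_seq)

-- ===== LEMMAS AND PROOFS =====

-- common validity test
def pvValid (c : Char) : Bool := "ACGTN".toList.contains (PySem.Chars.upperChar c)

-- reference recursion both ports are reduced to
def pvGo : List Char → Int → List (Option Int) × Int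
  | [], n => ([], n)
  | c :: cs, n =>
    if pvValid c then
      (some (n + 1) :: (pvGo cs (n + 1)).1, (pvGo cs (n + 1)).2)
    else
      (none :: (pvGo cs n).1, (pvGo cs n).2)

-- prefix sums of the flag list
def pvScan : List Bool → Int → List Int
  | [], _ => []
  | f :: fs, t => (t + (if f then 1 else 0)) :: pvScan fs (t + (if f then 1 else 0))

lemma valid_eq_A (c : Char) :
    (PySem.Set.contains BASES_STRICT (PySem.Chars.upperChar c)
      || (PySem.Chars.upperChar c == 'N')) = pvValid c := by
  have hb : BASES_STRICT = ['A','C','G','T'] := by decide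
  rw [hb, pvValid]
  generalize PySem.Chars.upperChar c = u
  have hs : "ACGTN".toList = ['A','C','G','T','N'] := by decide
  rw [hs]
  simp [Bool.or_assoc]
  by_cases h : u = 'N' <;> simp [beq_eq_decide, h]

lemma set_mid (pre : List (Option Int)) (x : Option Int) (rest : List (Option Int)) (v : Option Int) :
    PySem.List.pySetD (pre ++ x :: rest) (pre.length : Int) v = pre ++ v :: rest := by
  rw [PySem.List.pySetD_natCast, List.set_append]
  simp

lemma A_loop (cs : List Char) (pre : List (Option Int)) (n : Int) :
    (PySem.List.enumerate cs (pre.length : Int)).foldl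
      (fun (st : List (Option Int) × Int) (p : Int × Char) =>
        let r := PySem.Chars.upperChar p.2
        if PySem.Set.contains BASES_STRICT r || (r == 'N') then
          (PySem.List.pySetD st.1 p.1 (some (st.2 + 1)), st.2 + 1)
        else
          (PySem.List.pySetD st.1 p.1 none, st.2))
      (pre ++ List.replicate cs.length none, n)
    = (pre ++ (pvGo cs n).1, (pvGo cs n).2) := by
  induction cs generalizing pre n with
  | nil => simp [pvGo, PySem.List.enumerate_nil]
  | cons c cs ih =>
    rw [PySem.List.enumerate_cons, List.foldl_cons]
    simp only [List.length_cons, List.replicate_succ]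
    by_cases h : pvValid c
    · have hv := valid_eq_A c
      simp only [hv, h, if_pos, set_mid]
      have := ih (pre ++ [some (n+1)]) (n+1)
      simp only [List.length_append, List.length_cons, List.length_nil] at this
      push_cast at this
      simp only [List.append_assoc, List.cons_append, List.nil_append] at this
      rw [show ((pre.length : Int) + 1) = ((pre.length : Int) + (0+1)) by ring] at this ⊢
      rw [this]
      simp [pvGo, h]
    · have hv := valid_eq_A c
      simp only [hv, h, if_neg, set_mid, Bool.false_eq_true, not_false_iff]
      have := ih (pre ++ [none]) n
      simp only [List.length_append, List.length_cons, List.length_nil] at this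
      push_cast at this
      simp only [List.append_assoc, List.cons_append, List.nil_append] at this
      rw [show ((pre.length : Int) + 1) = ((pre.length : Int) + (0+1)) by ring] at this ⊢
      rw [this]
      simp [pvGo, h]

lemma getD_getLast?_irrel (l : List Int) (h : l ≠ []) (d e : Int) :
    l.getLast?.getD d = l.getLast?.getD e := by
  cases hl : l.getLast? with
  | none => exact absurd (List.getLast?_eq_none_iff.mp hl) h
  | some a => simp

lemma B_fold (fs : List Bool) (acc : List Int) (t : Int) :
    fs.foldl (fun (acc : List Int × Int) f =>
        let t := acc.2 + (if f then 1 else 0)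
        (acc.1 ++ [t], t)) (acc, t)
    = (acc ++ pvScan fs t, (pvScan fs t).getLast?.getD t) := by
  induction fs generalizing acc t with
  | nil => simp [pvScan]
  | cons f fs ih =>
    rw [List.foldl_cons]
    simp only [pvScan]
    rw [ih]
    cases hs : pvScan fs (t + (if f then 1 else 0)) with
    | nil => simp
    | cons a l =>
      have h2 : (a :: l).getLast?.getD (t + if f = true then 1 else 0)
          = (a :: l).getLast?.getD t := getD_getLast?_irrel _ (by simp) _ _
      simp [h2, List.getLast?_cons_cons]

lemma B_shape (cs : List Char) (n : Int) :
    ((cs.map pvValid).zip (pvScan (cs.map pvValid) n)).map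
        (fun p => if p.1 then some p.2 else none) = (pvGo cs n).1
    ∧ (pvScan (cs.map pvValid) n).getLast?.getD n = (pvGo cs n).2 := by
  induction cs generalizing n with
  | nil => simp [pvScan, pvGo]
  | cons c cs ih =>
    by_cases h : pvValid c
    · have := ih (n + 1)
      simp [pvScan, pvGo, h]
      constructor
      · exact this.1
      · cases hs : pvScan (cs.map pvValid) (n+1) with
        | nil => simpa [hs] using this.2
        | cons a l => simpa [hs] using this.2
    · have := ih n
      simp [pvScan, pvGo, h]
      constructor
      · exact this.1
      · cases hs : pvScan (cs.map pvValid) n with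
        | nil => simpa [hs] using this.2
        | cons a l => simpa [hs] using this.2

-- ===== VERDICT (by name: the statement is the Claim_ definition above) =====
theorem build_ref_nt_positions_spec : Claim_equal_build_ref_nt_positions := by
  intro s _
  unfold Spec_build_ref_nt_positions build_ref_nt_positions build_ref_nt_positions_alt
  have hA := A_loop s.toList [] 0
  simp only [List.length_nil, Nat.cast_zero, List.nil_append] at hA
  have hlen : (PySem.Str.len s).toNat = s.toList.length := by
    simp [PySem.Str.len]
  have hflags : s.toList.map (fun c => "ACGTN".toList.contains (PySem.Chars.upperChar c))
      = s.toList.map pvValid := rfl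
  have hB := B_fold (s.toList.map pvValid) [] 0
  have hS := B_shape s.toList 0
  simp only [hlen, hA, hflags, hB, List.nil_append, hS.1, hS.2]
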